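-- pv_equiv track=rewrite | github.com/SeismicSource/seiscat | seiscat/fetchdata/mass_downloader.py | _split_network_station_codes
-- ===== SOURCE A (Python) =====
-- def _split_network_station_codes(station_codes):
--     """
--     Split station code patterns into network and station restrictions.
--
--     Supports station-only tokens (e.g., ``ABC*``) and network-qualified tokens
--     (e.g., ``FR.ABC*``). If at least one qualified token is present, returns
--     both network and station comma-separated patterns for MassDownloader
--     restrictions.
--
--     :param station_codes: comma-separated station patterns
--     :returns: (network_patterns_or_none, station_patterns)
--     """
--     tokens = [tok.strip() for tok in station_codes.split(',') if tok.strip()]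
--     if all('.' not in tok for tok in tokens):
--         return None, ','.join(tokens)
--     networks = []
--     stations = []
--     for tok in tokens:
--         net, sta = tok.split('.', 1) if '.' in tok else ('*', tok)
--         networks.append(net)
--         stations.append(sta)
--     network_codes = ','.join(dict.fromkeys(networks))
--     station_patterns = ','.join(dict.fromkeys(stations))
--     return network_codes, station_patterns
-- ===== SOURCE B (Python) =====
-- def _uniq(items):
--     """Keep first occurrences: take the head, recurse on the tail with all
--     copies of the head filtered out (quick-dedup recursion, no dict/set)."""
--     if not items:
--         return []
--     first = items[0]
--     return [first] + _uniq([x for x in items[1:] if x != first])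
--
--
-- def _split_network_station_codes(station_codes):
--     """Declarative version: since ',' splitting and whitespace stripping never
--     touch a '.', a qualified token exists iff '.' occurs anywhere in the raw
--     string, so the guard is one substring test instead of a token scan; the
--     qualified branch is built from str.partition triples by comprehensions."""
--     tokens = [tok for tok in (piece.strip() for piece in station_codes.split(',')) if tok]
--     if '.' not in station_codes:
--         return None, ','.join(tokens)
--     parts = [tok.partition('.') for tok in tokens]
--     networks = [head if sep else '*' for head, sep, _ in parts]
--     stations = [tail if sep else head for head, sep, tail in parts]
--     return ','.join(_uniq(networks)), ','.join(_uniq(stations))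
-- ===== Notes on version B (the rewrite author's own statement) =====
-- stated objective: alternative
-- what changed: Replaces A's per-token all() dot-scan with a single dot-substring test on the raw input string (valid because comma-splitting and whitespace-stripping never consume a dot), builds str.partition triples consumed by comprehensions instead of A's split-and-append loop, and dedups by a recursive filter-out helper instead of dict.fromkeys.
import Mathlib
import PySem

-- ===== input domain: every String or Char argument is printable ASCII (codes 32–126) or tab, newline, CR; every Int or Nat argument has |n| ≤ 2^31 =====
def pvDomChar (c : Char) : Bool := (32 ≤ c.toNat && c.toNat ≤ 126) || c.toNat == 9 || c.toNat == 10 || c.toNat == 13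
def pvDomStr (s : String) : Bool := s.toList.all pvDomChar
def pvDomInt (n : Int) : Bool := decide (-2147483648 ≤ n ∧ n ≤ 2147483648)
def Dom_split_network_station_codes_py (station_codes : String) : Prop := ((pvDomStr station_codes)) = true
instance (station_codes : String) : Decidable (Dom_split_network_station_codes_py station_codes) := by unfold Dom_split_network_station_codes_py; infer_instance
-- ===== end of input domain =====

-- B replaces A's per-token all() dot-scan by one substring test on the raw string, A's
-- append loop by partition triples consumed by comprehensions, and dict.fromkeys by a
-- recursive filter-out dedup; objective: alternative decomposition, same results.

-- tok.split('.', 1) for a token containing '.': the part before the first '.' and the rest.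
-- Exact for tokens that contain '.' (A only calls it under that guard).
def pvSplitDot (tok : String) : String × String :=
  let cs := tok.toList
  let i := (PySem.Chars.find cs ['.']).toNat
  (String.ofList (cs.take i), String.ofList (cs.drop (i + 1)))

-- ===== PORT A =====
def split_network_station_codes_py (station_codes : String) : Option String × String :=
  let tokens := (((PySem.Str.split? station_codes ",").getD []).map PySem.Str.strip).filter (fun t => !(t == ""))
  if tokens.all (fun tok => !PySem.Str.isIn "." tok) then
    (none, PySem.Str.join "," tokens)
  else
    let ns := tokens.foldl
      (fun (acc : List String × List String) tok =>
        let p := if PySem.Str.isIn "." tok then pvSplitDot tok else ("*", tok)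
        (acc.1 ++ [p.1], acc.2 ++ [p.2]))
      ([], [])
    (some (PySem.Str.join "," (PySem.List.dedup ns.1)),
     PySem.Str.join "," (PySem.List.dedup ns.2))

-- ===== PORT B =====
-- tok.partition('.'): (before, ".", after) at the first '.', or (tok, "", "") if no '.'.
-- Exact for the separator "." (hand port; PySem has no partition primitive).
def pvPartitionDot (tok : String) : String × String × String :=
  if PySem.Str.isIn "." tok then
    let cs := tok.toList
    let i := (PySem.Chars.find cs ['.']).toNat
    (String.ofList (cs.take i), ".", String.ofList (cs.drop (i + 1)))
  else (tok, "", "")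

-- _uniq: keep the head, recurse on the tail with all copies of the head filtered out.
def pvUniq : List String → List String
  | [] => []
  | x :: rest => x :: pvUniq (rest.filter (fun y => !(y == x)))
  termination_by l => l.length
  decreasing_by
    simp only [List.length_unattach, List.length_cons]
    exact Nat.lt_succ_of_le (le_trans (List.length_filter_le _ _) (by simp))

def split_network_station_codes_py_alt (station_codes : String) : Option String × String :=
  let tokens := (((PySem.Str.split? station_codes ",").getD []).map PySem.Str.strip).filter (fun t => !(t == ""))
  if !PySem.Str.isIn "." station_codes then
    (none, PySem.Str.join "," tokens)
  else
    let parts := tokens.map pvPartitionDot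
    let networks := parts.map (fun p => if p.2.1 == "" then "*" else p.1)
    let stations := parts.map (fun p => if p.2.1 == "" then p.1 else p.2.2)
    (some (PySem.Str.join "," (pvUniq networks)),
     PySem.Str.join "," (pvUniq stations))

-- ===== PRECONDITION & SPEC =====
def Spec_split_network_station_codes_py (station_codes : String) (out : Option String × String) : Prop := out = split_network_station_codes_py_alt station_codes
instance (station_codes : String) (out : Option String × String) : Decidable (Spec_split_network_station_codes_py station_codes out) := by unfold Spec_split_network_station_codes_py; infer_instance

-- ===== CLAIM (what is proved, stated in full; the proofs are below) =====
def Claim_equal_split_network_station_codes_py : Prop := ∀ (station_codes : String), Dom_split_network_station_codes_py station_codes → Spec_split_network_station_codes_py station_codes (split_network_station_codes_py station_codes)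

-- ===== LEMMAS AND PROOFS =====

-- the per-token network / station projections both ports compute
def pvNet (tok : String) : String := if PySem.Str.isIn "." tok then (pvSplitDot tok).1 else "*"
def pvSta (tok : String) : String := if PySem.Str.isIn "." tok then (pvSplitDot tok).2 else tok

-- '.' is a one-character substring: being "in" a string is containing the char
theorem pvIsIn_dot (t : String) : PySem.Str.isIn "." t = true ↔ '.' ∈ t.toList := by
  simp [PySem.Chars.isIn_iff_infix, List.singleton_infix_iff]

-- dropping a whitespace prefix preserves containment of '.'
theorem pvDrop_mem (cs : List Char) : ('.' ∈ List.dropWhile PySem.Chars.isspace cs) ↔ '.' ∈ cs := by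
  constructor
  · exact fun h => (List.dropWhile_sublist _).mem h
  · intro h
    have hsplit : cs = List.takeWhile PySem.Chars.isspace cs ++ List.dropWhile PySem.Chars.isspace cs :=
      (List.takeWhile_append_dropWhile).symm
    rcases List.mem_append.1 (hsplit ▸ h) with h1 | h2
    · exact absurd (List.mem_takeWhile_imp h1) (by decide)
    · exact h2

-- strip only removes whitespace, so it preserves containment of '.'
theorem pvStrip_mem (cs : List Char) : ('.' ∈ PySem.Chars.strip cs) ↔ '.' ∈ cs := by
  simp only [PySem.Chars.strip, PySem.Chars.rstrip, PySem.Chars.lstrip, List.mem_reverse]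
  rw [pvDrop_mem, List.mem_reverse, pvDrop_mem]

-- the splitter worker: some produced piece contains '.' iff the state does ('.' ≠ ',')
theorem pvGo_any (fuel : Nat) (l cur : List Char) (acc : List (List Char)) :
    ((PySem.Chars.splitOn.go [','] fuel l cur acc).any (fun p => decide ('.' ∈ p)))
      = (acc.any (fun p => decide ('.' ∈ p)) || decide ('.' ∈ cur) || decide ('.' ∈ l)) := by
  induction fuel generalizing l cur acc with
  | zero => simp [PySem.Chars.splitOn.go, Bool.or_assoc]
  | succ n ih =>
    cases l with
    | nil => simp [PySem.Chars.splitOn.go]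
    | cons c rest =>
      rw [PySem.Chars.splitOn.go]
      by_cases hc : c = ','
      · subst hc
        have hp : List.isPrefixOf [','] (',' :: rest) = true := by simp [List.isPrefixOf]
        simp [hp, ih]
        ac_rfl
      · have hp : List.isPrefixOf [','] (c :: rest) = false := by
          simp [List.isPrefixOf]; exact fun h => absurd h.symm hc
        simp [hp, ih]
        ac_rfl

-- some piece of s.split(',') contains '.' iff s does
theorem pvSplitOn_any (cs : List Char) :
    ((PySem.Chars.splitOn cs [',']).any (fun p => decide ('.' ∈ p))) = decide ('.' ∈ cs) := by
  simp only [PySem.Chars.splitOn]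
  rw [pvGo_any]
  simp

-- A's all()-over-tokens guard equals B's substring test on the raw string
theorem pvGuard_eq (s : String) :
    (((((PySem.Str.split? s ",").getD []).map PySem.Str.strip).filter (fun t => !(t == ""))).all
      (fun tok => !PySem.Str.isIn "." tok)) = !PySem.Str.isIn "." s := by
  have hsplit : (PySem.Str.split? s ",").getD []
      = (PySem.Chars.splitOn s.toList [',']).map String.ofList := by
    simp [PySem.Str.split?, PySem.Chars.split?]
  rw [Bool.eq_iff_iff]
  simp only [hsplit, Bool.not_eq_eq_eq_not, Bool.not_true, List.all_eq_true, List.mem_filter,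
    List.mem_map]
  have hany := pvSplitOn_any s.toList
  rw [Bool.eq_iff_iff] at hany
  simp only [List.any_eq_true, decide_eq_true_eq] at hany
  constructor
  · intro hall
    rw [Bool.eq_false_iff]
    intro hdot
    obtain ⟨p, hp, hpd⟩ := hany.2 ((pvIsIn_dot s).1 hdot)
    have htokdot : '.' ∈ (PySem.Str.strip (String.ofList p)).toList := by
      simp only [PySem.Str.strip, String.toList_ofList]
      exact (pvStrip_mem p).2 hpd
    have hne : (PySem.Str.strip (String.ofList p) == "") = false := by
      rw [beq_eq_false_iff_ne]
      intro he
      rw [he] at htokdot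
      simp at htokdot
    have hthis := hall (PySem.Str.strip (String.ofList p)) ⟨⟨String.ofList p, ⟨p, hp, rfl⟩, rfl⟩, hne⟩
    have htrue := (pvIsIn_dot _).2 htokdot
    rw [hthis] at htrue
    exact absurd htrue (by decide)
  · intro hnd tok ⟨⟨t, ⟨p, hp, hto⟩, hts⟩, _⟩
    rw [Bool.eq_false_iff]
    intro hdot
    have h1 : '.' ∈ (PySem.Str.strip t).toList := by
      rw [hts]; exact (pvIsIn_dot tok).1 hdot
    rw [← hto] at h1
    simp only [PySem.Str.strip, String.toList_ofList] at h1
    have h2 : '.' ∈ s.toList := hany.1 ⟨p, hp, (pvStrip_mem p).1 h1⟩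
    have htrue := (pvIsIn_dot s).2 h2
    rw [hnd] at htrue
    exact absurd htrue (by decide)

-- loop lemmas for Python set-semantics dedup (used to equate pvUniq with dict.fromkeys)
theorem pvFoldl_add_cons (l : List String) (s : List String) (x : String)
    (h : ∀ z ∈ l, (z == x) = false) :
    l.foldl PySem.Set.add (x :: s) = x :: l.foldl PySem.Set.add s := by
  induction l generalizing s with
  | nil => rfl
  | cons a t ih =>
    have hax : (a == x) = false := h a List.mem_cons_self
    have : PySem.Set.add (x :: s) a = x :: PySem.Set.add s a := by
      simp only [PySem.Set.add, PySem.Set.contains]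
      have hcc : List.contains (x :: s) a = List.contains s a := by
        rw [List.contains_cons, hax, Bool.false_or]
      simp only [hcc]
      by_cases hsa : a ∈ s <;> simp [hsa]
    rw [List.foldl_cons, List.foldl_cons, this, ih _ (fun z hz => h z (List.mem_cons_of_mem _ hz))]

theorem pvFoldl_add_filter (l : List String) (s : List String) (x : String) (hx : x ∈ s) :
    l.foldl PySem.Set.add s = (l.filter (fun y => !(y == x))).foldl PySem.Set.add s := by
  induction l generalizing s with
  | nil => rfl
  | cons a t ih =>
    by_cases ha : (a == x) = true
    · have hadd : PySem.Set.add s a = s := by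
        simp only [PySem.Set.add, PySem.Set.contains]
        have hmem : a ∈ s := (beq_iff_eq.1 ha) ▸ hx
        simp [hmem]
      simp only [List.filter_cons, ha, Bool.not_true, List.foldl_cons, hadd]
      simpa using ih s hx
    · have hmem : x ∈ PySem.Set.add s a := by
        simp only [PySem.Set.add, PySem.Set.contains]
        by_cases hsa : a ∈ s <;> simp [hsa, hx]
      simp only [List.filter_cons, ha, Bool.not_false, List.foldl_cons]
      exact ih _ hmem

theorem pvUniq_eq_ofList (n : Nat) : ∀ (l : List String), l.length ≤ n → pvUniq l = PySem.Set.ofList l := by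
  induction n with
  | zero =>
    intro l hl
    rw [List.length_eq_zero_iff.1 (Nat.le_zero.1 hl)]
    simp [pvUniq]
  | succ n ih =>
    intro l hl
    cases l with
    | nil => simp [pvUniq]
    | cons x rest =>
      rw [pvUniq]
      have hflen : (rest.filter (fun y => !(y == x))).length ≤ n :=
        le_trans (List.length_filter_le _ _) (by simpa using hl)
      rw [ih _ hflen]
      show _ = List.foldl PySem.Set.add (PySem.Set.add PySem.Set.empty x) rest
      have hempty : PySem.Set.add PySem.Set.empty x = [x] := by
        simp [PySem.Set.add, PySem.Set.empty, PySem.Set.contains]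
      rw [hempty, pvFoldl_add_filter rest [x] x (List.mem_singleton.2 rfl)]
      rw [pvFoldl_add_cons _ [] x (fun z hz => by simpa using (List.mem_filter.1 hz).2)]
      rfl

theorem pvUniq_eq_dedup (l : List String) : pvUniq l = PySem.List.dedup l := by
  rw [PySem.List.dedup_eq_ofList]
  exact pvUniq_eq_ofList l.length l le_rfl

-- B's projections of the partition triple are the shared per-token values
theorem pvPartNet (tok : String) :
    (if (pvPartitionDot tok).2.1 == "" then "*" else (pvPartitionDot tok).1) = pvNet tok := by
  by_cases h : PySem.Chars.isIn ['.'] tok.toList = true <;>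
    simp [pvPartitionDot, pvNet, pvSplitDot, PySem.Str.isIn, h]

theorem pvPartSta (tok : String) :
    (if (pvPartitionDot tok).2.1 == "" then (pvPartitionDot tok).1 else (pvPartitionDot tok).2.2) = pvSta tok := by
  by_cases h : PySem.Chars.isIn ['.'] tok.toList = true <;>
    simp [pvPartitionDot, pvSta, pvSplitDot, PySem.Str.isIn, h]

-- ===== VERDICT (by name: the statement is the Claim_ definition above) =====
theorem split_network_station_codes_py_spec : Claim_equal_split_network_station_codes_py := by
  intro s _
  show split_network_station_codes_py s = split_network_station_codes_py_alt s
  simp only [split_network_station_codes_py, split_network_station_codes_py_alt, pvGuard_eq]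
  cases hdot : PySem.Str.isIn "." s with
  | false => simp
  | true =>
    simp only [Bool.not_true, Bool.false_eq_true]
    rw [PySem.List.foldl_prod_mk
      (f := fun a tok => a ++ [(if PySem.Str.isIn "." tok then pvSplitDot tok else ("*", tok)).1])
      (g := fun a tok => a ++ [(if PySem.Str.isIn "." tok then pvSplitDot tok else ("*", tok)).2])]
    rw [PySem.List.foldl_append_singleton_eq_map, PySem.List.foldl_append_singleton_eq_map]
    simp only [List.nil_append, List.map_map, Function.comp_def, pvPartNet, pvPartSta,
      pvUniq_eq_dedup]
    have hnet : (fun tok => (if PySem.Str.isIn "." tok then pvSplitDot tok else ("*", tok)).1) = pvNet := by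
      funext tok; by_cases h : PySem.Chars.isIn ['.'] tok.toList = true <;>
        simp [pvNet, PySem.Str.isIn, h]
    have hsta : (fun tok => (if PySem.Str.isIn "." tok then pvSplitDot tok else ("*", tok)).2) = pvSta := by
      funext tok; by_cases h : PySem.Chars.isIn ['.'] tok.toList = true <;>
        simp [pvSta, PySem.Str.isIn, h]
    rw [hnet, hsta]
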